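-- pv_equiv track=rewrite | github.com/chausler/tropical_forest | mcparseface/mcparseface.py | sents2docs
-- ===== SOURCE A (Python) =====
-- DUMMY = '654321'
--
-- FIRST = 0
--
-- def is_dummy(sent):
--     return len(sent) == 1 and sent[FIRST][0] == DUMMY
--
-- def sents2docs(sents):
--     i, l = 0, len(sents)
--     result = []
--     temp = []
--     while i < l:
--         sent = sents[i]
--         if not is_dummy(sent):
--             temp.extend(sent)
--         else:
--             result.append(temp)
--             temp = []
--         i += 1
--     return result
-- ===== SOURCE B (Python) =====
-- DUMMY = '654321'
--
--
-- def sents2docs(sents):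
--     # Collect the indices of the dummy separator sentences, then cut the list
--     # into slices between consecutive separators and flatten each slice.
--     dummy_idxs = [i for i, s in enumerate(sents) if len(s) == 1 and s[0][0] == DUMMY]
--     result = []
--     start = 0
--     for idx in dummy_idxs:
--         result.append([tok for sent in sents[start:idx] for tok in sent])
--         start = idx + 1
--     return result
-- ===== Notes on version B (the rewrite author's own statement) =====
-- stated objective: alternative
-- what changed: A's single accumulator loop (extend temp, flush on dummy) is replaced by a two-phase decomposition: first collect the indices of all dummy separator sentences, then build each document by flattening the slice of sentences between consecutive separators.
import Mathlib
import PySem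

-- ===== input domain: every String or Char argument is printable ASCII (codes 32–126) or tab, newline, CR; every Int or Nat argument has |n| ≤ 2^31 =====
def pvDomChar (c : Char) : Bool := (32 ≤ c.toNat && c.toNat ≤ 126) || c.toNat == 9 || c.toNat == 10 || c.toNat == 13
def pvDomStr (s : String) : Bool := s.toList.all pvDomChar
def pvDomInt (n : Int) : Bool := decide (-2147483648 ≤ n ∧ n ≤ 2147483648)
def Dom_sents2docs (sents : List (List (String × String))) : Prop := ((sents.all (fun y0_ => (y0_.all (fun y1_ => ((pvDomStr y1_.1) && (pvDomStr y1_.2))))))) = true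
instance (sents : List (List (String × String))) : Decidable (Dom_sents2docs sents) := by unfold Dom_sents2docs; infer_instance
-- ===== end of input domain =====

-- B replaces A's single accumulator loop by a two-phase decomposition (collect dummy indices,
-- then slice-and-flatten between them); objective: alternative decomposition, same cost.


-- ===== PORT A =====
-- is_dummy(sent): 'len(sent) == 1 and sent[0][0] == DUMMY'; sent[0] is only evaluated
-- under the length guard, so the getD default is never the decider (exact).
def isDummyA (sent : List (String × String)) : Bool :=
  sent.length == 1 && (((PySem.List.pyGet? sent 0).getD ("", "")).1 == "654321")

-- the 'while i < l' loop of A, as structural recursion over the remaining sentences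
-- with the same state (result, temp)
def sents2docsLoop (sents : List (List (String × String)))
    (result : List (List (String × String))) (temp : List (String × String)) :
    List (List (String × String)) :=
  match sents with
  | [] => result
  | sent :: rest =>
      if ¬ isDummyA sent then sents2docsLoop rest result (temp ++ sent)
      else sents2docsLoop rest (result ++ [temp]) []

def sents2docs (sents : List (List (String × String))) : List (List (String × String)) :=
  sents2docsLoop sents [] []

-- ===== PORT B =====
-- the comprehension's condition 'len(s) == 1 and s[0][0] == DUMMY'
def isDummyB (sent : List (String × String)) : Bool :=
  sent.length == 1 && (((PySem.List.pyGet? sent 0).getD ("", "")).1 == "654321")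

-- '[i for i, s in enumerate(sents) if …]', carrying enumerate's index
def dummyIdxsAux (sents : List (List (String × String))) (i : Nat) : List Nat :=
  match sents with
  | [] => []
  | s :: rest => if isDummyB s then i :: dummyIdxsAux rest (i + 1) else dummyIdxsAux rest (i + 1)

-- the 'for idx in dummy_idxs' loop: state (result, start); sents[start:idx] is a slice
def sents2docs_alt (sents : List (List (String × String))) : List (List (String × String)) :=
  ((dummyIdxsAux sents 0).foldl
    (fun (acc : List (List (String × String)) × Nat) (idx : Nat) =>
      (acc.1 ++ [(PySem.List.slice sents (some (acc.2 : Int)) (some (idx : Int))).flatMap id],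
       idx + 1))
    ([], 0)).1

-- ===== PRECONDITION & SPEC =====
def Spec_sents2docs (sents : List (List (String × String))) (out : List (List (String × String))) : Prop := out = sents2docs_alt sents
instance (sents : List (List (String × String))) (out : List (List (String × String))) : Decidable (Spec_sents2docs sents out) := by unfold Spec_sents2docs; infer_instance

-- ===== CLAIM (what is proved, stated in full; the proofs are below) =====
def Claim_equal_sents2docs : Prop := ∀ (sents : List (List (String × String))), Dom_sents2docs sents → Spec_sents2docs sents (sents2docs sents)

-- ===== LEMMAS AND PROOFS =====

-- reference recursion both ports are reduced to
def docsRef (sents : List (List (String × String))) (temp : List (String × String)) :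
    List (List (String × String)) :=
  match sents with
  | [] => []
  | s :: rest => if isDummyA s then temp :: docsRef rest [] else docsRef rest (temp ++ s)

def addPrefix (temp : List (String × String)) :
    List (List (String × String)) → List (List (String × String))
  | [] => []
  | d :: ds => (temp ++ d) :: ds

lemma loop_eq_docsRef (sents : List (List (String × String))) :
    ∀ result temp, sents2docsLoop sents result temp = result ++ docsRef sents temp := by
  induction sents with
  | nil => intro result temp; simp [sents2docsLoop, docsRef]
  | cons s rest ih =>
      intro result temp
      by_cases h : isDummyA s = true <;>
        simp [sents2docsLoop, docsRef, h, ih]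

lemma dummyIdxsAux_succ (sents : List (List (String × String))) :
    ∀ i, dummyIdxsAux sents (i + 1) = (dummyIdxsAux sents i).map (· + 1) := by
  induction sents with
  | nil => intro i; simp [dummyIdxsAux]
  | cons s rest ih =>
      intro i
      by_cases h : isDummyB s = true <;> simp [dummyIdxsAux, h, ih]

-- abbreviation for B's fold step on a fixed sentence list
def gstep (sents : List (List (String × String)))
    (acc : List (List (String × String)) × Nat) (idx : Nat) :
    List (List (String × String)) × Nat :=
  (acc.1 ++ [(PySem.List.slice sents (some (acc.2 : Int)) (some (idx : Int))).flatMap id], idx + 1)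

lemma alt_eq_fold (sents : List (List (String × String))) :
    sents2docs_alt sents = ((dummyIdxsAux sents 0).foldl (gstep sents) ([], 0)).1 := by
  rfl

lemma foldl_gstep_acc (sents : List (List (String × String))) (idxs : List Nat) :
    ∀ a k, (idxs.foldl (gstep sents) (a, k)).1 = a ++ (idxs.foldl (gstep sents) ([], k)).1 := by
  induction idxs with
  | nil => intro a k; simp
  | cons i rest ih =>
      intro a k
      simp only [List.foldl_cons, gstep, List.nil_append]
      conv_lhs => rw [ih]
      conv_rhs => rw [ih]
      simp [List.append_assoc]

lemma slice_cons_succ (s : List (String × String)) (r : List (List (String × String)))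
    (a b : Nat) :
    PySem.List.slice (s :: r) (some ((a + 1 : Nat) : Int)) (some ((b + 1 : Nat) : Int)) =
      PySem.List.slice r (some (a : Int)) (some (b : Int)) := by
  rw [PySem.List.slice_natCast, PySem.List.slice_natCast]
  simp

lemma slice_cons_zero (s : List (String × String)) (r : List (List (String × String))) (b : Nat) :
    PySem.List.slice (s :: r) (some ((0 : Nat) : Int)) (some ((b + 1 : Nat) : Int)) =
      s :: PySem.List.slice r (some ((0 : Nat) : Int)) (some (b : Int)) := by
  rw [PySem.List.slice_natCast, PySem.List.slice_natCast]
  simp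

lemma fold_shift (s : List (String × String)) (r : List (List (String × String)))
    (idxs : List Nat) :
    ∀ a k, ((idxs.map (· + 1)).foldl (gstep (s :: r)) (a, k + 1)).1 =
      (idxs.foldl (gstep r) (a, k)).1 := by
  induction idxs with
  | nil => intro a k; simp
  | cons i rest ih =>
      intro a k
      simp only [List.map_cons, List.foldl_cons, gstep]
      rw [slice_cons_succ]
      exact ih _ (i + 1)

lemma docsRef_eq_addPrefix_alt (sents : List (List (String × String))) :
    ∀ temp, docsRef sents temp = addPrefix temp (sents2docs_alt sents) := by
  induction sents with
  | nil => intro temp; simp [docsRef, sents2docs_alt, dummyIdxsAux, addPrefix]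
  | cons s rest ih =>
      intro temp
      rw [alt_eq_fold]
      by_cases h : isDummyA s = true
      · have hB : isDummyB s = true := h
        simp only [docsRef, h, if_pos]
        rw [ih []]
        simp only [dummyIdxsAux, hB, if_pos, List.foldl_cons, gstep,
          dummyIdxsAux_succ rest 0]
        have h0 : PySem.List.slice (s :: rest) (some ((0 : Nat) : Int)) (some ((0 : Nat) : Int))
            = [] := by
          rw [PySem.List.slice_natCast]; simp
        rw [h0]
        simp only [List.flatMap_nil, List.nil_append]
        rw [fold_shift s rest (dummyIdxsAux rest 0) [([] : List (String × String))] 0]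
        rw [foldl_gstep_acc rest (dummyIdxsAux rest 0) [([] : List (String × String))] 0]
        rw [alt_eq_fold]
        cases (dummyIdxsAux rest 0).foldl (gstep rest) ([], 0) |>.1 with
        | nil => simp [addPrefix]
        | cons d ds => simp [addPrefix]
      · have hB : ¬ isDummyB s = true := h
        simp only [docsRef, h, if_neg, Bool.not_eq_true]
        rw [ih (temp ++ s)]
        simp only [dummyIdxsAux, hB, if_neg, Bool.not_eq_true, dummyIdxsAux_succ rest 0]
        rw [alt_eq_fold]
        cases hidx : dummyIdxsAux rest 0 with
        | nil => simp [addPrefix]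
        | cons i is =>
            simp only [List.map_cons, List.foldl_cons, gstep, List.nil_append]
            rw [slice_cons_zero]
            rw [fold_shift s rest is _ (i + 1), foldl_gstep_acc rest is _ (i + 1)]
            have hT := foldl_gstep_acc rest is [s ++ (List.take i rest).flatten] (i + 1)
            simp [addPrefix, List.append_assoc, hT]

-- ===== VERDICT (by name: the statement is the Claim_ definition above) =====
theorem sents2docs_spec : Claim_equal_sents2docs := by
  intro sents _
  show sents2docs sents = sents2docs_alt sents
  rw [sents2docs, loop_eq_docsRef, docsRef_eq_addPrefix_alt]
  cases h : sents2docs_alt sents with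
  | nil => simp [addPrefix]
  | cons d ds => simp [addPrefix]
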